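-- pv_equiv track=rewrite | github.com/pypi-data/pypi-mirror-402 | packages/drap/drap-0.0.4.post15.tar.gz/drap-0.0.4.post15/src/drap/utils.py | _int_to_fourcc
-- ===== SOURCE A (Python) =====
-- def _int_to_fourcc(v: int) -> str:
--     if not v:
--         return ""
--     chars = []
--     for i in range(4):
--         chars.append(chr((v >> (8 * i)) & 0xFF))
--     s = "".join(chars)
--     if not s.isprintable():
--         return ""
--     return s
-- ===== SOURCE B (Python) =====
-- def _int_to_fourcc(v: int) -> str:
--     if not v:
--         return ""
--     s = (v & 0xFFFFFFFF).to_bytes(4, "little").decode("latin-1")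
--     if not s.isprintable():
--         return ""
--     return s
-- ===== Notes on version B (the rewrite author's own statement) =====
-- stated objective: idiomatic
-- what changed: Replaces the explicit range(4) shift/chr/append loop and join with a single masked to_bytes(4,'little').decode('latin-1') conversion.
import Mathlib
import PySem

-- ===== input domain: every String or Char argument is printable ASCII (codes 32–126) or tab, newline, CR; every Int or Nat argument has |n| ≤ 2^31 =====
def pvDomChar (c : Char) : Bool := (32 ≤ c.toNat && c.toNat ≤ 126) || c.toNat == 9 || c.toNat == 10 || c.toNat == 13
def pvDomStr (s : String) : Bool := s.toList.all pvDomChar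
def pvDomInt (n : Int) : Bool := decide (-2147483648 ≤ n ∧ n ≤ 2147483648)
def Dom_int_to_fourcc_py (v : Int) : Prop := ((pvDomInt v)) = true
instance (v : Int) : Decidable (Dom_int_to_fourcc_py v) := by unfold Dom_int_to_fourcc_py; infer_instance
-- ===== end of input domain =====

-- B replaces A's explicit shift/chr loop by one masked little-endian 4-byte conversion (idiomatic; same cost).

-- str.isprintable, exact for codepoints ≤ 255 (the only ones these ports produce):
-- non-printable below 256 are 0–31, 127–160 and 173 (soft hyphen).
def pyIsPrintableChar (c : Char) : Bool :=
  (32 ≤ c.toNat && c.toNat ≤ 126) || (161 ≤ c.toNat && c.toNat ≤ 255 && c.toNat != 173)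

def pyIsPrintable (s : String) : Bool := s.toList.all pyIsPrintableChar

-- ===== PORT A =====
-- 'v >> (8*i)' is floor division by 2^(8*i) (Python arithmetic shift), '& 0xFF' is mod 256.
def int_to_fourcc_py (v : Int) : String :=
  if v == 0 then "" else
    let chars : List Char := (PySem.List.pyRange 0 4 1).foldl
      (fun acc i =>
        acc ++ [Char.ofNat ((PySem.Int.mod (PySem.Int.floordiv v (2 ^ (8 * i).toNat)) 256).toNat)]) []
    let s := String.mk chars
    if ¬ pyIsPrintable s then "" else s

-- ===== PORT B =====
-- 'v & 0xFFFFFFFF' is mod 2^32; to_bytes(4,"little").decode("latin-1") is the four base-256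
-- digits of the mask, least significant first, each as the char of that code (exact, hand port).
def int_to_fourcc_py_alt (v : Int) : String :=
  if v == 0 then "" else
    let m : Nat := (PySem.Int.mod v 4294967296).toNat
    let s := String.mk [Char.ofNat (m % 256), Char.ofNat (m / 256 % 256),
                        Char.ofNat (m / 65536 % 256), Char.ofNat (m / 16777216 % 256)]
    if ¬ pyIsPrintable s then "" else s

-- ===== PRECONDITION & SPEC =====
def Spec_int_to_fourcc_py (v : Int) (out : String) : Prop := out = int_to_fourcc_py_alt v
instance (v : Int) (out : String) : Decidable (Spec_int_to_fourcc_py v out) := by unfold Spec_int_to_fourcc_py; infer_instance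

-- ===== CLAIM (what is proved, stated in full; the proofs are below) =====
def Claim_equal_int_to_fourcc_py : Prop := ∀ (v : Int), Dom_int_to_fourcc_py v → Spec_int_to_fourcc_py v (int_to_fourcc_py v)

-- ===== LEMMAS AND PROOFS =====

theorem bytes_eq (v : Int) :
    ((v % 256).toNat = (v % 4294967296).toNat % 256)
    ∧ ((v / 256 % 256).toNat = (v % 4294967296).toNat / 256 % 256)
    ∧ ((v / 65536 % 256).toNat = (v % 4294967296).toNat / 65536 % 256)
    ∧ ((v / 16777216 % 256).toNat = (v % 4294967296).toNat / 16777216 % 256) := by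
  refine ⟨?_, ?_, ?_, ?_⟩ <;> omega

-- ===== VERDICT (by name: the statement is the Claim_ definition above) =====
theorem int_to_fourcc_py_spec : Claim_equal_int_to_fourcc_py := by
  intro v _
  unfold Spec_int_to_fourcc_py int_to_fourcc_py int_to_fourcc_py_alt
  by_cases h : v = 0
  · simp [h]
  · simp only [beq_iff_eq, h, if_false]
    have hr : PySem.List.pyRange 0 4 1 = [0, 1, 2, 3] := by decide
    simp only [hr, List.foldl]
    norm_num
    simp only [show Int.toNat 8 = 8 from rfl, show Int.toNat 16 = 16 from rfl,
      show Int.toNat 24 = 24 from rfl]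
    norm_num
    have hb := bytes_eq v
    rw [hb.1, hb.2.1, hb.2.2.1, hb.2.2.2]
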